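-- pv_equiv track=rewrite | github.com/oscarjimenez05/juniorseminar | source/crypto/xor_lh_breaker.py | get_real_sequence
-- ===== SOURCE A (Python) =====
-- import math
--
-- def real_xorshift64_step(x):
--     x = (x ^ (x << 13)) & 0xFFFFFFFFFFFFFFFF
--     x = (x ^ (x >> 7)) & 0xFFFFFFFFFFFFFFFF
--     x = (x ^ (x << 17)) & 0xFFFFFFFFFFFFFFFF
--     return x
--
-- def get_real_sequence(seed, w, delta, minimum, maximum, count):
--     state = seed
--     outputs = []
--
--     R = math.factorial(w)
--
--     window = []
--     for _ in range(w):
--         state = real_xorshift64_step(state)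
--         window.append(state)
--
--     while len(outputs) < count:
--         lehmer = 0
--         factorials = [math.factorial(w - i - 1) for i in range(w)]
--         for i in range(w):
--             smaller = 0
--             for j in range(i + 1, w):
--                 if window[j] < window[i]:
--                     smaller += 1
--             lehmer += smaller * factorials[i]
--
--         if lehmer < R:
--             outputs.append(lehmer)
--
--         new_window = window[delta:]
--         for _ in range(delta):
--             state = real_xorshift64_step(state)
--             new_window.append(state)
--         window = new_window
--
--     return outputs
-- ===== SOURCE B (Python) =====
-- import math
-- from bisect import bisect_left, insort
--
--
-- def _xs64_step(x):
--     x = (x ^ (x << 13)) & 0xFFFFFFFFFFFFFFFF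
--     x = (x ^ (x >> 7)) & 0xFFFFFFFFFFFFFFFF
--     x = (x ^ (x << 17)) & 0xFFFFFFFFFFFFFFFF
--     return x
--
--
-- def _lehmer(win):
--     # Lehmer code by sorted-suffix insertion: scan from the right, keep the
--     # elements already seen in a sorted list; bisect_left gives the count of
--     # strictly smaller elements to the right; factorial weight grows as we go.
--     code = 0
--     fact = 1
--     seen = []
--     r = 0
--     for x in reversed(win):
--         code += bisect_left(seen, x) * fact
--         insort(seen, x)
--         r += 1
--         fact *= r
--     return code
--
--
-- def get_real_sequence(seed, w, delta, minimum, maximum, count):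
--     n = count if count > 0 else 0
--     state = seed
--     window = []
--     for _ in range(w):
--         state = _xs64_step(state)
--         window.append(state)
--     out = []
--     for k in range(n):
--         if k:
--             window = window[delta:]
--             for _ in range(delta):
--                 state = _xs64_step(state)
--                 window.append(state)
--         out.append(_lehmer(window[:w]))
--     return out
-- ===== Notes on version B (the rewrite author's own statement) =====
-- stated objective: faster
-- what changed: B computes each window's Lehmer code by a right-to-left bisect_left/insort scan over a sorted 'seen' list with incrementally maintained factorial weights, instead of A's nested O(w^2) index scans plus a per-window math.factorial table, and drives the output with a for-range of the known count instead of A's guarded while loop with an always-true 'lehmer < w!' test.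
import Mathlib
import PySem

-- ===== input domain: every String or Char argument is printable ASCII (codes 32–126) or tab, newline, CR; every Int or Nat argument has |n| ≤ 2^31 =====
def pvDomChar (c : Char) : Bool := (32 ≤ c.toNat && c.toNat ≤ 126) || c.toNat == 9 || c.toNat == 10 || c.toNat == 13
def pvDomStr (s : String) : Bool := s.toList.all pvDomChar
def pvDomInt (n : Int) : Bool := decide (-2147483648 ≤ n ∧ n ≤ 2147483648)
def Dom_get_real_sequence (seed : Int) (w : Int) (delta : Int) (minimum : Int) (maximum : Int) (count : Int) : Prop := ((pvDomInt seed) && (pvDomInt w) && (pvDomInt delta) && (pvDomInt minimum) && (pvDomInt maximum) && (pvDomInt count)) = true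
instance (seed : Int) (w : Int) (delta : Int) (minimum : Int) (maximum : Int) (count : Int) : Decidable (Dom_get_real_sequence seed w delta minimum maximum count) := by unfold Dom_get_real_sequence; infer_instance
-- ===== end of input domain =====

-- B replaces A's nested-scan Lehmer code of each window by a right-to-left
-- sorted-insertion (bisect_left/insort) count with incrementally maintained
-- factorial weights, and iterates a for-range with the count known upfront
-- instead of A's guarded while loop with a factorial table per window.

-- ===== PORT A =====

-- x = (x ^ (x << 13)) & MASK; … (both Pythons define this same step function)
def pvXorStep (x : Int) : Int :=
  let x1 := PySem.Int.band (PySem.Int.bxor x (x <<< (13 : Nat))) (2 ^ 64 - 1)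
  let x2 := PySem.Int.band (PySem.Int.bxor x1 (x1 >>> (7 : Nat))) (2 ^ 64 - 1)
  PySem.Int.band (PySem.Int.bxor x2 (x2 <<< (17 : Nat))) (2 ^ 64 - 1)

-- 'for _ in range(n): state = step(state); window.append(state)'
def pvExtend : Nat → Int → List Int → Int × List Int
  | 0, s, l => (s, l)
  | n + 1, s, l => pvExtend n (pvXorStep s) (l ++ [pvXorStep s])

-- A's per-window Lehmer code: factorial table + nested index scans.
-- window[j] is PySem.List.pyGetD (indices are in range on Pre_; Python raises outside it).
def pvLehmerA (window : List Int) (w : Int) : Int :=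
  let factorials := (PySem.List.pyRange 0 w 1).map (fun i => ((w - i - 1).toNat.factorial : Int))
  (PySem.List.pyRange 0 w 1).foldl
    (fun lehmer i =>
      let smaller : Int := (PySem.List.pyRange (i + 1) w 1).foldl
        (fun s j => if PySem.List.pyGetD window j 0 < PySem.List.pyGetD window i 0 then s + 1 else s) 0
      lehmer + smaller * PySem.List.pyGetD factorials i 0) 0

-- 'new_window = window[delta:]; for _ in range(delta): state = step(state); new_window.append(state)'
def pvSlide (delta : Int) (state : Int) (window : List Int) : Int × List Int :=
  pvExtend delta.toNat state (PySem.List.slice window (some delta) none)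

-- the 'while len(outputs) < count' loop; each iteration appends one output
-- (lehmer < R always holds, proved below), so fuel count.toNat is exact.
def pvLoopA (w delta R count : Int) : Nat → Int → List Int → List Int → List Int
  | 0, _, _, outputs => outputs
  | fuel + 1, state, window, outputs =>
    if (outputs.length : Int) < count then
      let lehmer := pvLehmerA window w
      let outputs' := if lehmer < R then outputs ++ [lehmer] else outputs
      let sw := pvSlide delta state window
      pvLoopA w delta R count fuel sw.1 sw.2 outputs'
    else outputs

def get_real_sequence (seed : Int) (w : Int) (delta : Int) (minimum : Int) (maximum : Int) (count : Int) : List Int :=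
  -- R = math.factorial(w): raises ValueError for w < 0 (excluded by Pre_)
  let R : Int := (w.toNat.factorial : Int)
  let sw := pvExtend w.toNat seed []
  pvLoopA w delta R count count.toNat sw.1 sw.2 []

-- ===== PORT B =====

-- _lehmer: right-to-left scan, sorted 'seen' list, bisect_left + insort,
-- factorial weight maintained incrementally.  State = (code, fact, seen, r).
def pvLehmerB (win : List Int) : Int :=
  (win.reverse.foldl
    (fun (st : Int × Int × List Int × Nat) x =>
      let code := st.1 + (PySem.List.bisectLeft st.2.2.1 x : Int) * st.2.1
      let seen := List.orderedInsert (· ≤ ·) x st.2.2.1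
      let r := st.2.2.2 + 1
      (code, st.2.1 * (r : Int), seen, r))
    ((0 : Int), (1 : Int), ([] : List Int), (0 : Nat))).1

-- 'for k in range(n): if k: <slide>; out.append(_lehmer(window[:w]))'
def pvLoopB (w delta : Int) : Nat → Nat → Int → List Int → List Int → List Int
  | 0, _, _, _, out => out
  | m + 1, k, state, window, out =>
    let sw := if k ≠ 0 then pvSlide delta state window else (state, window)
    pvLoopB w delta m (k + 1) sw.1 sw.2 (out ++ [pvLehmerB (PySem.List.slice sw.2 none (some w))])

def get_real_sequence_alt (seed : Int) (w : Int) (delta : Int) (minimum : Int) (maximum : Int) (count : Int) : List Int :=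
  let n := (if count > 0 then count else 0).toNat
  let sw := pvExtend w.toNat seed []
  pvLoopB w delta n 0 sw.1 sw.2 []

-- ===== PRECONDITION & SPEC =====

-- Pre_ excludes exactly the inputs where the Python A raises: w < 0 (math.factorial
-- ValueError) and -w < delta < 0 with count ≥ 2 (the window shrinks below w and
-- window[j] raises IndexError).  On every other input A returns normally.
def Pre_get_real_sequence (seed : Int) (w : Int) (delta : Int) (minimum : Int) (maximum : Int) (count : Int) : Prop :=
  0 ≤ w ∧ (0 ≤ delta ∨ count ≤ 1 ∨ delta + w ≤ 0)
instance (seed : Int) (w : Int) (delta : Int) (minimum : Int) (maximum : Int) (count : Int) : Decidable (Pre_get_real_sequence seed w delta minimum maximum count) := by unfold Pre_get_real_sequence; infer_instance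

def pvWitness_get_real_sequence : Int × Int × Int × Int × Int × Int := (7, 3, 1, 0, 0, 4)

def Spec_get_real_sequence (seed : Int) (w : Int) (delta : Int) (minimum : Int) (maximum : Int) (count : Int) (out : List Int) : Prop := out = get_real_sequence_alt seed w delta minimum maximum count
instance (seed : Int) (w : Int) (delta : Int) (minimum : Int) (maximum : Int) (count : Int) (out : List Int) : Decidable (Spec_get_real_sequence seed w delta minimum maximum count out) := by unfold Spec_get_real_sequence; infer_instance

-- ===== CLAIM (what is proved, stated in full; the proofs are below) =====
def Claim_equal_get_real_sequence : Prop := ∀ (seed : Int) (w : Int) (delta : Int) (minimum : Int) (maximum : Int) (count : Int), Dom_get_real_sequence seed w delta minimum maximum count → Pre_get_real_sequence seed w delta minimum maximum count → Spec_get_real_sequence seed w delta minimum maximum count (get_real_sequence seed w delta minimum maximum count)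

-- ===== LEMMAS AND PROOFS =====

-- The common specification of one window's Lehmer code, structurally:
-- digit of the head = number of strictly smaller elements to its right.
def pvSpec : List Int → Int
  | [] => 0
  | x :: l => ((l.countP (fun y => decide (y < x)) : Nat) : Int) * (l.length.factorial : Int) + pvSpec l

-- the stream of per-window codes produced from a starting state and window
def pvChainA (w delta : Int) : Nat → Int → List Int → List Int
  | 0, _, _ => []
  | m + 1, s, win => pvLehmerA win w :: pvChainA w delta m (pvSlide delta s win).1 (pvSlide delta s win).2

def pvChainB (w delta : Int) : Nat → Int → List Int → List Int
  | 0, _, _ => []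
  | m + 1, s, win => pvLehmerB (PySem.List.slice win none (some w)) :: pvChainB w delta m (pvSlide delta s win).1 (pvSlide delta s win).2

-- basic facts ---------------------------------------------------------------

lemma pvExtend_length (n : Nat) (s : Int) (l : List Int) :
    (pvExtend n s l).2.length = l.length + n := by
  induction n generalizing s l with
  | zero => simp [pvExtend]
  | succ n ih => rw [pvExtend, ih]; simp; omega

lemma pvSlide_length (delta : Int) (wn : Nat)
    (hd : 0 ≤ delta ∨ delta + (wn : Int) ≤ 0) (s : Int) (win : List Int)
    (h : wn ≤ win.length) : wn ≤ (pvSlide delta s win).2.length := by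
  by_cases hdp : 0 ≤ delta
  · unfold pvSlide
    rw [PySem.List.slice_from win hdp, pvExtend_length]
    simp only [List.length_drop]
    omega
  · -- delta < 0, so delta + wn ≤ 0, i.e. wn ≤ -delta
    have hwle : (wn : Int) ≤ -delta := by rcases hd with h' | h' <;> omega
    have hk : delta = -((-delta).toNat : Int) := by omega
    unfold pvSlide
    rw [hk, PySem.List.slice_some_none,
      PySem.List.clampIdx_neg_natCast _ _ (by omega), pvExtend_length]
    simp only [List.length_drop]
    omega

-- Lehmer A = spec ------------------------------------------------------------

lemma pvCountP_range_getD (l : List Int) (m : Nat) (hm : m ≤ l.length) (p : Int → Bool) :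
    (List.range m).countP (fun j => p (l.getD j 0)) = (l.take m).countP p := by
  induction m with
  | zero => simp
  | succ m ih =>
    rw [List.range_succ, List.countP_append, ih (by omega), List.take_add_one,
      List.countP_append]
    have hget : l[m]?.toList = [l.getD m 0] := by
      rw [List.getElem?_eq_getElem (by omega : m < l.length)]
      simp [List.getD, List.getElem?_eq_getElem (by omega : m < l.length)]
    rw [hget]
    simp

-- A's lehmer computation as a Nat-indexed sum
def pvSumForm (win : List Int) (wn : Nat) : Int :=
  ((List.range wn).map (fun k =>
    (((List.range (wn - (k + 1))).countP
        (fun j => decide (win.getD (k + 1 + j) 0 < win.getD k 0)) : Nat) : Int)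
      * (((wn - 1 - k).factorial : Nat) : Int))).sum

lemma pvLehmerA_sumForm (win : List Int) (wn : Nat) :
    pvLehmerA win (wn : Int) = pvSumForm win wn := by
  unfold pvLehmerA pvSumForm
  rw [PySem.List.foldl_add]
  simp only [zero_add]
  congr 1
  rw [PySem.List.pyRange_one]
  simp only [zero_add, Int.sub_zero, Int.toNat_natCast, List.map_map]
  apply List.map_congr_left
  intro k hk
  rw [List.mem_range] at hk
  simp only [Function.comp_apply]
  congr 1
  · -- the inner counting loop
    rw [PySem.List.foldl_ite_add_one
        (p := fun j => PySem.List.pyGetD win j 0 < PySem.List.pyGetD win (k : Int) 0)]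
    simp only [zero_add]
    rw [PySem.List.pyRange_one]
    have hlen : ((wn : Int) - ((k : Int) + 1)).toNat = wn - (k + 1) := by omega
    rw [hlen, List.countP_map]
    refine congrArg _ (List.countP_congr (fun j _ => ?_))
    have hidx : ((k : Int) + 1 + (j : Int)) = ((k + 1 + j : Nat) : Int) := by push_cast; ring
    simp only [Function.comp_apply, hidx, PySem.List.pyGetD_natCast]
  · -- factorials[i]
    rw [PySem.List.pyGetD_natCast, PySem.List.getD_map_range _ _ _ _ hk]
    simp only [Function.comp_apply]
    congr 2
    omega

lemma pvSumForm_spec : ∀ (wn : Nat) (win : List Int), wn ≤ win.length →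
    pvSumForm win wn = pvSpec (win.take wn) := by
  intro wn
  induction wn with
  | zero => intro win _; simp [pvSumForm, pvSpec]
  | succ m ih =>
    intro win hlen
    cases win with
    | nil => simp at hlen
    | cons x l =>
      simp only [List.length_cons] at hlen
      have hml : m ≤ l.length := by omega
      rw [List.take_succ_cons]
      unfold pvSumForm
      rw [List.range_succ_eq_map, List.map_cons, List.sum_cons, List.map_map]
      have hhead :
          ((((List.range (m + 1 - (0 + 1))).countP
              (fun j => decide ((x :: l).getD (0 + 1 + j) 0 < (x :: l).getD 0 0)) : Nat) : Int)
            * (((m + 1 - 1 - 0).factorial : Nat) : Int))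
          = (((l.take m).countP (fun y => decide (y < x)) : Nat) : Int)
            * (((l.take m).length.factorial : Nat) : Int) := by
        have h1 : (List.range (m + 1 - (0 + 1))).countP
            (fun j => decide ((x :: l).getD (0 + 1 + j) 0 < (x :: l).getD 0 0))
            = (l.take m).countP (fun y => decide (y < x)) := by
          have : (fun j => decide ((x :: l).getD (0 + 1 + j) 0 < (x :: l).getD 0 0))
              = fun j => (fun y => decide (y < x)) (l.getD j 0) := by
            funext j
            have : 0 + 1 + j = j + 1 := by omega
            rw [this, List.getD_cons_succ, List.getD_cons_zero]
          rw [show m + 1 - (0 + 1) = m by omega, this]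
          exact pvCountP_range_getD l m hml (fun y => decide (y < x))
        rw [h1, List.length_take, Nat.min_eq_left hml]
        norm_num
      rw [hhead]
      have htail :
          ((List.range m).map ((fun k =>
            (((List.range (m + 1 - (k + 1))).countP
                (fun j => decide ((x :: l).getD (k + 1 + j) 0 < (x :: l).getD k 0)) : Nat) : Int)
              * (((m + 1 - 1 - k).factorial : Nat) : Int)) ∘ Nat.succ)).sum
          = pvSumForm l m := by
        unfold pvSumForm
        congr 1
        apply List.map_congr_left
        intro k hk
        simp only [Function.comp_apply, Nat.succ_eq_add_one]
        have e1 : m + 1 - (k + 1 + 1) = m - (k + 1) := by omega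
        have e2 : m + 1 - 1 - (k + 1) = m - 1 - k := by omega
        have e3 : (fun j => decide ((x :: l).getD (k + 1 + 1 + j) 0 < (x :: l).getD (k + 1) 0))
            = fun j => decide (l.getD (k + 1 + j) 0 < l.getD k 0) := by
          funext j
          have : k + 1 + 1 + j = (k + 1 + j) + 1 := by omega
          rw [this, List.getD_cons_succ, List.getD_cons_succ]
        rw [e1, e2, e3]
      rw [htail, ih l hml]
      simp [pvSpec]

lemma pvLehmerA_spec (win : List Int) (wn : Nat) (h : wn ≤ win.length) :
    pvLehmerA win (wn : Int) = pvSpec (win.take wn) := by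
  rw [pvLehmerA_sumForm, pvSumForm_spec wn win h]

-- Lehmer B = spec ------------------------------------------------------------

lemma pvBisectLeft_count (seen : List Int) (x : Int) (hs : seen.Pairwise (· ≤ ·)) :
    PySem.List.bisectLeft seen x = seen.countP (fun y => decide (y < x)) := by
  obtain ⟨hle, hlt, hge⟩ := PySem.List.bisectLeft_spec seen x hs
  set b := PySem.List.bisectLeft seen x with hb
  rw [← List.take_append_drop b seen, List.countP_append]
  have h1 : (seen.take b).countP (fun y => decide (y < x)) = (seen.take b).length := by
    rw [List.countP_eq_length]
    intro y hy
    obtain ⟨j, hj, rfl⟩ := List.mem_iff_getElem.mp hy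
    rw [List.length_take] at hj
    have hjl : j < seen.length := lt_of_lt_of_le (lt_of_lt_of_le hj (min_le_right _ _)) le_rfl
    rw [List.getElem_take]
    simpa using hlt j hjl (lt_of_lt_of_le hj (min_le_left _ _))
  have h2 : (seen.drop b).countP (fun y => decide (y < x)) = 0 := by
    rw [List.countP_eq_zero]
    intro y hy
    obtain ⟨j, hj, rfl⟩ := List.mem_iff_getElem.mp hy
    rw [List.length_drop] at hj
    rw [List.getElem_drop]
    have := hge (b + j) (by omega) (by omega)
    simpa using not_lt.mpr this
  rw [h1, h2, List.length_take]
  omega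

lemma pvLehmerB_inv (l : List Int) :
    ∃ seen, (l.reverse.foldl
      (fun (st : Int × Int × List Int × Nat) x =>
        let code := st.1 + (PySem.List.bisectLeft st.2.2.1 x : Int) * st.2.1
        let seen := List.orderedInsert (· ≤ ·) x st.2.2.1
        let r := st.2.2.2 + 1
        (code, st.2.1 * (r : Int), seen, r))
      ((0 : Int), (1 : Int), ([] : List Int), (0 : Nat)))
      = (pvSpec l, (l.length.factorial : Int), seen, l.length)
      ∧ seen.Perm l ∧ seen.Pairwise (· ≤ ·) := by
  induction l with
  | nil => exact ⟨[], by simp [pvSpec], List.Perm.refl _, List.Pairwise.nil⟩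
  | cons x l ih =>
    obtain ⟨seen, hfold, hperm, hsort⟩ := ih
    refine ⟨List.orderedInsert (· ≤ ·) x seen, ?_, ?_, ?_⟩
    · rw [List.reverse_cons, List.foldl_append, hfold]
      simp only [List.foldl_cons, List.foldl_nil]
      have hcount : PySem.List.bisectLeft seen x = l.countP (fun y => decide (y < x)) := by
        rw [pvBisectLeft_count seen x hsort, List.Perm.countP_eq _ hperm]
      rw [hcount]
      simp only [pvSpec, List.length_cons, Nat.factorial_succ, Prod.mk.injEq]
      refine ⟨by ring, ?_, trivial⟩
      push_cast
      ring
    · exact (List.perm_orderedInsert _ x seen).trans (hperm.cons x)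
    · exact List.Pairwise.orderedInsert x seen hsort
  
lemma pvLehmerB_spec (l : List Int) : pvLehmerB l = pvSpec l := by
  obtain ⟨seen, h, -, -⟩ := pvLehmerB_inv l
  unfold pvLehmerB
  rw [h]

-- the Lehmer code is < w! ----------------------------------------------------

lemma pvSpec_lt (l : List Int) : pvSpec l < (l.length.factorial : Int) := by
  induction l with
  | nil => norm_num [pvSpec]
  | cons x l ih =>
    simp only [pvSpec, List.length_cons, Nat.factorial_succ]
    have hc : ((l.countP (fun y => decide (y < x)) : Nat) : Int) ≤ (l.length : Int) := by
      exact_mod_cast List.countP_le_length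
    have hf : (0 : Int) < (l.length.factorial : Int) := by exact_mod_cast l.length.factorial_pos
    push_cast
    nlinarith

lemma pvLehmerA_lt (win : List Int) (wn : Nat) (h : wn ≤ win.length) :
    pvLehmerA win (wn : Int) < (wn.factorial : Int) := by
  rw [pvLehmerA_spec win wn h]
  have := pvSpec_lt (win.take wn)
  rwa [List.length_take, Nat.min_eq_left h] at this

-- chain equalities -----------------------------------------------------------

lemma pvChainA_eq_pvChainB (wn : Nat) (delta : Int)
    (hd : 0 ≤ delta ∨ delta + (wn : Int) ≤ 0) :
    ∀ (m : Nat) (s : Int) (win : List Int), wn ≤ win.length →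
      pvChainA (wn : Int) delta m s win = pvChainB (wn : Int) delta m s win := by
  intro m
  induction m with
  | zero => intro s win _; rfl
  | succ m ih =>
    intro s win hw
    simp only [pvChainA, pvChainB, PySem.List.slice_to_natCast, List.cons.injEq]
    refine ⟨?_, ?_⟩
    · rw [pvLehmerA_spec win wn hw, ← pvLehmerB_spec]
    · exact ih _ _ (pvSlide_length delta wn hd s win hw)

lemma pvChainA_eq_pvChainB_one (wn : Nat) (delta : Int) (s : Int) (win : List Int)
    (hw : wn ≤ win.length) (m : Nat) (hm : m ≤ 1) :
    pvChainA (wn : Int) delta m s win = pvChainB (wn : Int) delta m s win := by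
  interval_cases m
  · rfl
  · simp only [pvChainA, pvChainB, PySem.List.slice_to_natCast, List.cons.injEq]
    exact ⟨by rw [pvLehmerA_spec win wn hw, ← pvLehmerB_spec], trivial⟩

-- loops produce the chains ---------------------------------------------------

-- invariant threaded through A's while loop: the window never falls below wn
def pvInv (wn : Nat) (delta : Int) : Prop :=
  ∀ s win, wn ≤ List.length win → wn ≤ (pvSlide delta s win).2.length

lemma pvLoopA_eq_chain (wn : Nat) (delta count : Int) (hinv : pvInv wn delta) :
    ∀ (m : Nat) (s : Int) (win : List Int) (out : List Int), wn ≤ win.length →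
      ((out.length : Int) + m = count) →
      pvLoopA (wn : Int) delta (wn.factorial : Int) count m s win out
        = out ++ pvChainA (wn : Int) delta m s win := by
  intro m
  induction m with
  | zero => intro s win out _ _; simp [pvLoopA, pvChainA]
  | succ m ih =>
    intro s win out hw hcnt
    rw [pvLoopA, if_pos (show ((out.length : Int)) < count by omega)]
    simp only [if_pos (pvLehmerA_lt win wn hw)]
    rw [ih _ _ _ (hinv s win hw) (by simp; omega)]
    simp [pvChainA]

-- small-count variant: one iteration needs no window invariant
lemma pvLoopA_eq_chain_small (wn : Nat) (delta count : Int) (hc : count ≤ 1) :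
    ∀ (m : Nat) (s : Int) (win : List Int), wn ≤ win.length → ((m : Int) = count) →
      pvLoopA (wn : Int) delta (wn.factorial : Int) count m s win []
        = pvChainA (wn : Int) delta m s win := by
  intro m s win hw hcnt
  have hm1 : m = 0 ∨ m = 1 := by omega
  rcases hm1 with rfl | rfl
  · simp [pvLoopA, pvChainA]
  · rw [pvLoopA, if_pos (show (([] : List Int).length : Int) < count by simp; omega)]
    simp only [if_pos (pvLehmerA_lt win wn hw)]
    rw [pvLoopA]
    simp [pvChainA]

lemma pvLoopB_eq_chain (w delta : Int) :
    ∀ (m : Nat) (j : Nat) (s : Int) (win : List Int) (out : List Int),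
      pvLoopB w delta m (j + 1) s win out
        = out ++ pvChainB w delta m (pvSlide delta s win).1 (pvSlide delta s win).2 := by
  intro m
  induction m with
  | zero => intro j s win out; simp [pvLoopB, pvChainB]
  | succ m ih =>
    intro j s win out
    simp only [pvLoopB, ne_eq, Nat.succ_ne_zero, not_false_eq_true, if_true, ih]
    simp [pvChainB]

lemma pvLoopB_top (w delta : Int) (n : Nat) (s : Int) (win : List Int) :
    pvLoopB w delta n 0 s win [] = pvChainB w delta n s win := by
  cases n with
  | zero => rfl
  | succ m =>
    have h0 : pvLoopB w delta (m + 1) 0 s win []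
        = pvLoopB w delta m 1 s win ([] ++ [pvLehmerB (PySem.List.slice win none (some w))]) := by
      rw [pvLoopB]; norm_num
    rw [h0, pvLoopB_eq_chain w delta m 0]
    simp [pvChainB]

-- ===== VERDICT (by name: the statement is the Claim_ definition above) =====
theorem get_real_sequence_spec : Claim_equal_get_real_sequence := by
  intro seed w delta minimum maximum count _hdom hpre
  obtain ⟨hw, hcase⟩ := hpre
  obtain ⟨wn, rfl⟩ : ∃ n : Nat, w = (n : Int) := ⟨w.toNat, (Int.toNat_of_nonneg hw).symm⟩
  unfold Spec_get_real_sequence get_real_sequence get_real_sequence_alt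
  have hn : (if count > 0 then count else 0).toNat = count.toNat := by
    split <;> omega
  rw [hn, Int.toNat_natCast, pvLoopB_top]
  by_cases hc0 : count ≤ 0
  · rw [show count.toNat = 0 from by omega]
    rfl
  · have hwinlen : wn ≤ (pvExtend wn seed []).2.length := by
      rw [pvExtend_length]; simp
    by_cases hc1 : count ≤ 1
    · have hm : count.toNat = 1 := by omega
      rw [hm, pvLoopA_eq_chain_small wn delta count hc1 1 _ _ hwinlen (by omega)]
      rw [pvChainA_eq_pvChainB_one wn delta _ _ hwinlen 1 le_rfl]
    · have hd : 0 ≤ delta ∨ delta + (wn : Int) ≤ 0 := by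
        rcases hcase with h | h | h
        · exact Or.inl h
        · omega
        · exact Or.inr h
      have hinv : pvInv wn delta := fun s win hlen => pvSlide_length delta wn hd s win hlen
      rw [pvLoopA_eq_chain wn delta count hinv count.toNat _ _ [] hwinlen (by simp; omega)]
      rw [pvChainA_eq_pvChainB wn delta hd count.toNat _ _ hwinlen]
      rfl
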